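-- pv_equiv track=rewrite | github.com/vre-charite/service_dataops_gr | resources/number_factoring.py | factoring_best_combo
-- ===== SOURCE A (Python) =====
-- def factoring_best_combo(my_num):
--     best_combo = [0, 0, 0]
--     start_j = 0 if my_num < 4 else 1
--     for i in range(10):
--         for j in range(start_j, i + 1):
--             factor_one = i + 1
--             factor_two = j + 1
--             if factor_one * factor_two > best_combo[2] \
--                 and factor_one * factor_two <= my_num:
--                 best_combo[0] = factor_one
--                 best_combo[1] = factor_two
--                 best_combo[2] = factor_one * factor_two
--     return best_combo[0], best_combo[1], best_combo[2]
-- ===== SOURCE B (Python) =====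
-- def factoring_best_combo(my_num):
--     # descending product search: first feasible product is the max; smallest divisor a
--     # (with cofactor b = p//a, minf <= b <= a <= 10) reproduces A's first-hit tie-break
--     minf = 2 if my_num >= 4 else 1
--     top = min(my_num, 100)
--     for p in range(top, 0, -1):
--         for a in range(1, 11):
--             if p % a == 0:
--                 b = p // a
--                 if minf <= b <= a:
--                     return a, b, p
--     return 0, 0, 0
-- ===== Notes on version B (the rewrite author's own statement) =====
-- stated objective: alternative
-- what changed: Instead of scanning the fixed triangular grid of factor pairs while tracking the best product so far, B enumerates candidate products descending from the cap and returns at the first product that factors as a*b with minf <= b <= a within the allowed factor range, choosing the smallest such a to match A's tie-break.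
import Mathlib
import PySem

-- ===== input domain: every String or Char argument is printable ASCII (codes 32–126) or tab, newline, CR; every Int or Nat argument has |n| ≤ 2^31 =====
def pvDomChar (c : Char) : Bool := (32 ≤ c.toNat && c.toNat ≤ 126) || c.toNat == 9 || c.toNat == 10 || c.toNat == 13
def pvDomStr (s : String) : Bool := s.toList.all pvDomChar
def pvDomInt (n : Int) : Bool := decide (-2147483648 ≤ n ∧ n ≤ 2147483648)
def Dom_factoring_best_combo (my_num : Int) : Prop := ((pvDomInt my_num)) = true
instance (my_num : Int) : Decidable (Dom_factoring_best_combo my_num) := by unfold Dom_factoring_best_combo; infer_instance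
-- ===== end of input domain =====

-- B replaces A's 55-pair grid scan by a descending search over candidate products that
-- returns at the first factorable product (objective: alternative decomposition).

-- ===== PORT A =====
def factoring_best_combo (my_num : Int) : Int × Int × Int :=
  let start_j : Int := if my_num < 4 then 0 else 1
  let best :=
    (PySem.List.pyRange 0 10 1).foldl (fun best i =>
      (PySem.List.pyRange start_j (i + 1) 1).foldl (fun best j =>
        let factor_one := i + 1
        let factor_two := j + 1
        if factor_one * factor_two > best.2.2 ∧ factor_one * factor_two ≤ my_num then
          (factor_one, factor_two, factor_one * factor_two)
        else best) best) ((0 : Int), (0 : Int), (0 : Int))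
  (best.1, best.2.1, best.2.2)

-- ===== PORT B =====
-- inner scan: smallest divisor a of p with minf ≤ p//a ≤ a (early return ported as findSome?)
def pvAltInner (minf p : Int) : Option (Int × Int × Int) :=
  (PySem.List.pyRange 1 11 1).findSome? (fun a =>
    if PySem.Int.mod p a = 0 then
      let b := PySem.Int.floordiv p a
      if minf ≤ b ∧ b ≤ a then some (a, b, p) else none
    else none)

def factoring_best_combo_alt (my_num : Int) : Int × Int × Int :=
  let minf : Int := if my_num ≥ 4 then 2 else 1
  let top : Int := min my_num 100
  match (PySem.List.pyRange top 0 (-1)).findSome? (fun p => pvAltInner minf p) with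
  | some r => r
  | none => ((0 : Int), (0 : Int), (0 : Int))

-- ===== PRECONDITION & SPEC =====
def Spec_factoring_best_combo (my_num : Int) (out : Int × Int × Int) : Prop := out = factoring_best_combo_alt my_num
instance (my_num : Int) (out : Int × Int × Int) : Decidable (Spec_factoring_best_combo my_num out) := by unfold Spec_factoring_best_combo; infer_instance

-- ===== CLAIM (what is proved, stated in full; the proofs are below) =====
def Claim_equal_factoring_best_combo : Prop := ∀ (my_num : Int), Dom_factoring_best_combo my_num → Spec_factoring_best_combo my_num (factoring_best_combo my_num)

-- ===== LEMMAS AND PROOFS =====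

-- clamp my_num into [0, 100]; both programs only see my_num through that window
def pvClamp (n : Int) : Int := max 0 (min n 100)

theorem pvA_clamp (n : Int) : factoring_best_combo n = factoring_best_combo (pvClamp n) := by
  have hs : ((if n < 4 then (0:Int) else 1)) = (if pvClamp n < 4 then (0:Int) else 1) := by
    unfold pvClamp; split_ifs <;> omega
  simp only [factoring_best_combo, hs]
  refine congrArg (fun b : Int × Int × Int => (b.1, b.2.1, b.2.2)) ?_
  apply PySem.List.foldl_congr_mem
  intro acc i hi
  apply PySem.List.foldl_congr_mem
  intro acc2 j hj
  have hi' := (PySem.List.mem_pyRange_one).1 hi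
  have hj' := (PySem.List.mem_pyRange_one).1 hj
  have hj0 : (0:Int) ≤ j := by split_ifs at hj' <;> omega
  have hle : ((i+1) * (j+1) ≤ n) ↔ ((i+1) * (j+1) ≤ pvClamp n) := by
    unfold pvClamp
    have h1 : 1 ≤ (i+1) * (j+1) := by nlinarith [hi'.1, hj0]
    have h2 : (i+1) * (j+1) ≤ 100 := by nlinarith [hi'.1, hi'.2, hj0, hj'.2]
    constructor <;> intro h <;> omega
  simp only [hle]

theorem pvB_clamp (n : Int) : factoring_best_combo_alt n = factoring_best_combo_alt (pvClamp n) := by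
  have hm : ((if n ≥ 4 then (2:Int) else 1)) = (if pvClamp n ≥ 4 then (2:Int) else 1) := by
    unfold pvClamp; split_ifs <;> omega
  have hr : PySem.List.pyRange (min n 100) 0 (-1) = PySem.List.pyRange (min (pvClamp n) 100) 0 (-1) := by
    by_cases h : n ≤ 0
    · rw [PySem.List.pyRange_neg_one_eq_nil (by omega), PySem.List.pyRange_neg_one_eq_nil (by unfold pvClamp; omega)]
    · have : min n 100 = min (pvClamp n) 100 := by unfold pvClamp; omega
      rw [this]
  simp only [factoring_best_combo_alt, hm, hr]

set_option maxRecDepth 100000 in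
set_option maxHeartbeats 2000000 in
theorem pvAB_small : ∀ k : Fin 101, factoring_best_combo (k : Int) = factoring_best_combo_alt (k : Int) := by decide

-- ===== VERDICT (by name: the statement is the Claim_ definition above) =====
theorem factoring_best_combo_spec : Claim_equal_factoring_best_combo := by
  intro n _
  unfold Spec_factoring_best_combo
  rw [pvA_clamp, pvB_clamp]
  have h : pvClamp n = ((⟨(pvClamp n).toNat, by unfold pvClamp; omega⟩ : Fin 101) : Int) := by
    simp; unfold pvClamp; omega
  rw [h]
  exact pvAB_small _
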